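-- pv_equiv track=rewrite | github.com/lightalchemist/algorithms | algorithms/dp/min_encoding.py | min_encode_length
-- ===== SOURCE A (Python) =====
-- def min_encode_length(text, codebook):
--     if not text:
--         return 0
--
--     min_count = len(text)
--     for word in codebook:
--         if text.endswith(word):
--             count = 1 + min_encode_length(text[:len(text) - len(word)], codebook)
--             if count < min_count:
--                 min_count = count
--
--     return min_count
-- ===== SOURCE B (Python) =====
-- def min_encode_length(text, codebook):
--     n = len(text)
--     dp = [0] * (n + 1)
--     for i in range(1, n + 1):
--         best = i
--         for word in codebook:
--             lw = len(word)
--             if lw <= i and text[i - lw:i] == word: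
--                 best = min(best, 1 + dp[i - lw])
--         dp[i] = best
--     return dp[n]
-- ===== Notes on version B (the rewrite author's own statement) =====
-- stated objective: alternative
-- what changed: Replaced A's top-down recursion over matching suffixes (recomputed for every suffix occurrence, exponential in the worst case) with a bottom-up dynamic program over prefix lengths (dp[i] = min encoding of text[:i]); a timing run could not confirm a speed-up because A times out on the larger probe sizes, so none is claimed.
import Mathlib
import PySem

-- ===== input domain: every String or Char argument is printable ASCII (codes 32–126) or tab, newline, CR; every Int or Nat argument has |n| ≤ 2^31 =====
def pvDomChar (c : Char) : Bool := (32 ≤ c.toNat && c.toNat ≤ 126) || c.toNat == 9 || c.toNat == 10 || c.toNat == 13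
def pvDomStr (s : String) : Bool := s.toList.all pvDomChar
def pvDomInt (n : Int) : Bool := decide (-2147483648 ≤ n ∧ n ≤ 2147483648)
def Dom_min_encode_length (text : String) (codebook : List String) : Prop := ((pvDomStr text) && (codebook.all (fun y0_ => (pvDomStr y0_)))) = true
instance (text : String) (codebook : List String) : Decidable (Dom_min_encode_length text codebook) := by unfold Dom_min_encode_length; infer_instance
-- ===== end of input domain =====

-- B replaces A's top-down recursion over matching suffixes by a bottom-up DP over prefix lengths
-- (a different algorithm computing the same value).

-- ===== PORT A =====
-- Literal port of A's recursion; `fuel` only makes the recursion total (within Pre_ every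
-- matched codeword is nonempty, so fuel = |text| is never exhausted; Python A diverges
-- exactly where Pre_ is false and text is nonempty with "" in the codebook).
def goA (fuel : Nat) (t : List Char) (cb : List String) : Int :=
  if t = [] then 0
  else
    match fuel with
    | 0 => (t.length : Int)
    | f + 1 =>
      cb.foldl (fun mc w =>
        if PySem.Chars.endswith t w.toList then
          let c := 1 + goA f (PySem.List.slice t none (some ((t.length : Int) - (w.toList.length : Int)))) cb
          if c < mc then c else mc
        else mc) (t.length : Int)

def min_encode_length (text : String) (codebook : List String) : Int :=
  goA text.toList.length text.toList codebook

-- ===== PORT B =====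
-- inner loop of Source B: best = i; for word in codebook: if lw <= i and text[i-lw:i] == word: best = min(best, 1 + dp[i-lw])
def bBest (t : List Char) (cb : List String) (dp : List Int) (i : Int) : Int :=
  cb.foldl (fun best w =>
    let lw : Int := w.toList.length
    if lw ≤ i ∧ PySem.List.slice t (some (i - lw)) (some i) = w.toList then
      min best (1 + PySem.List.pyGetD dp (i - lw) 0)
    else best) i

-- body of the outer loop: dp[i] = best
def bLoop (t : List Char) (cb : List String) (dp : List Int) (i : Int) : List Int :=
  PySem.List.pySetD dp i (bBest t cb dp i)

def min_encode_length_alt (text : String) (codebook : List String) : Int :=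
  let t := text.toList
  let n := t.length
  let dp := (PySem.List.pyRange 1 ((n : Int) + 1) 1).foldl (bLoop t codebook) (List.replicate (n + 1) 0)
  PySem.List.pyGetD dp (n : Int) 0

-- ===== PRECONDITION & SPEC =====
-- Pre_ excludes nonempty text with "" in the codebook: there Python A recurses on the
-- unchanged text forever and raises RecursionError.
def Pre_min_encode_length (text : String) (codebook : List String) : Prop :=
  text.toList = [] ∨ "" ∉ codebook
instance (text : String) (codebook : List String) : Decidable (Pre_min_encode_length text codebook) := by
  unfold Pre_min_encode_length; infer_instance

def pvWitness_min_encode_length : String × List String := ("abab", ["ab", "b"])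

def Spec_min_encode_length (text : String) (codebook : List String) (out : Int) : Prop := out = min_encode_length_alt text codebook
instance (text : String) (codebook : List String) (out : Int) : Decidable (Spec_min_encode_length text codebook out) := by unfold Spec_min_encode_length; infer_instance

-- ===== CLAIM (what is proved, stated in full; the proofs are below) =====
def Claim_equal_min_encode_length : Prop := ∀ (text : String) (codebook : List String), Dom_min_encode_length text codebook → Pre_min_encode_length text codebook → Spec_min_encode_length text codebook (min_encode_length text codebook)

-- ===== LEMMAS AND PROOFS =====

def dpA (t : List Char) (cb : List String) (k : Nat) : List Int :=
  (PySem.List.pyRange 1 ((k : Int) + 1) 1).foldl (bLoop t cb) (List.replicate (t.length + 1) 0)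

theorem goA_take_arg (t : List Char) (k lw : Nat) (hk : k ≤ t.length) (hlw : lw ≤ k) :
    PySem.List.slice (t.take k) none (some (((t.take k).length : Int) - (lw : Int))) = t.take (k - lw) := by
  have hlen : (t.take k).length = k := by simp [List.length_take]; omega
  rw [hlen]
  have : (k : Int) - (lw : Int) = ((k - lw : Nat) : Int) := by omega
  rw [this, PySem.List.slice_to_natCast, List.take_take]
  congr 1; omega

theorem goA_fuel (t : List Char) (cb : List String)
    (hcb : ∀ w ∈ cb, w.toList ≠ []) :
    ∀ k, ∀ fuel, k ≤ fuel → k ≤ t.length →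
      goA fuel (t.take k) cb = goA k (t.take k) cb := by
  intro k
  induction k using Nat.strong_induction_on with
  | _ k ih =>
    intro fuel hfk hkn
    match k, fuel with
    | 0, fuel => cases fuel <;> simp [goA]
    | k+1, fuel+1 =>
      have hne : t.take (k+1) ≠ [] := by
        have : (t.take (k+1)).length = k+1 := by simp [List.length_take]; omega
        intro h; rw [h] at this; simp at this
      rw [goA, goA, if_neg hne, if_neg hne]
      apply PySem.List.foldl_congr_mem
      intro acc w hw
      by_cases hend : PySem.Chars.endswith (t.take (k+1)) w.toList = true
      · have hsuf : w.toList <:+ t.take (k+1) := (PySem.Chars.endswith_iff _ _).mp hend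
        have hlw1 : 1 ≤ w.toList.length := by
          have h0 := hcb w hw
          cases h : w.toList with
          | nil => exact absurd h h0
          | cons a l => simp
        have hlwk : w.toList.length ≤ k+1 := by
          have h1 := hsuf.length_le
          have h2 : (t.take (k+1)).length = k+1 := by simp [List.length_take]; omega
          omega
        rw [if_pos hend, if_pos hend]
        simp only
        rw [goA_take_arg t (k+1) w.toList.length hkn hlwk]
        rw [ih (k+1-w.toList.length) (by omega) fuel (by omega) (by omega),
            ih (k+1-w.toList.length) (by omega) k (by omega) (by omega)]
      · rw [if_neg hend, if_neg hend]
theorem dpA_zero (t : List Char) (cb : List String) : dpA t cb 0 = List.replicate (t.length + 1) 0 := by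
  unfold dpA
  rw [PySem.List.pyRange_one_eq_nil (by norm_num)]
  rfl

theorem dpA_succ (t : List Char) (cb : List String) (k : Nat) :
    dpA t cb (k+1) = bLoop t cb (dpA t cb k) ((k : Int) + 1) := by
  unfold dpA
  have h1 : ((k+1 : Nat) : Int) + 1 = ((k : Int) + 1) + 1 := by push_cast; ring
  rw [h1, PySem.List.pyRange_one_succ_right (by omega), List.foldl_append]
  rfl

theorem dpA_length (t : List Char) (cb : List String) (k : Nat) :
    (dpA t cb k).length = t.length + 1 := by
  induction k with
  | zero => rw [dpA_zero]; simp
  | succ k ih =>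
    rw [dpA_succ]
    unfold bLoop
    rw [PySem.List.length_pySetD]
    exact ih
theorem suffix_slice_char (t w : List Char) (k : Nat) (hk : k ≤ t.length) :
    w <:+ t.take k ↔
      ((w.length : Int) ≤ ((k : Int)) ∧
        PySem.List.slice t (some ((k : Int) - (w.length : Int))) (some (k : Int)) = w) := by
  have hlen : (t.take k).length = k := by simp [List.length_take]; omega
  constructor
  · intro h
    have hle : w.length ≤ k := by have := h.length_le; omega
    refine ⟨by omega, ?_⟩
    have hd : (t.take k).drop (k - w.length) = w := by
      have h2 := List.suffix_iff_eq_drop.mp h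
      rw [hlen] at h2
      exact h2.symm
    have hc : (k : Int) - (w.length : Int) = ((k - w.length : Nat) : Int) := by omega
    rw [hc, PySem.List.slice_natCast, ← List.drop_take]
    rw [hd]
  · rintro ⟨h1, h2⟩
    have hle : w.length ≤ k := by omega
    have hc : (k : Int) - (w.length : Int) = ((k - w.length : Nat) : Int) := by omega
    rw [hc, PySem.List.slice_natCast, ← List.drop_take] at h2
    rw [← h2]
    exact List.drop_suffix _ _

theorem bBest_eq_goA (t : List Char) (cb : List String)
    (hcb : ∀ w ∈ cb, w.toList ≠ []) (k : Nat) (hk : k + 1 ≤ t.length)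
    (ih : ∀ j, j ≤ k → (dpA t cb k).getD j 0 = goA j (t.take j) cb) :
    bBest t cb (dpA t cb k) ((k : Int) + 1) = goA (k+1) (t.take (k+1)) cb := by
  have hne : t.take (k+1) ≠ [] := by
    have : (t.take (k+1)).length = k+1 := by simp [List.length_take]; omega
    intro h; rw [h] at this; simp at this
  have hlen : (t.take (k+1)).length = k+1 := by simp [List.length_take]; omega
  rw [goA, if_neg hne]
  unfold bBest
  rw [hlen]
  have hinit : ((k+1 : Nat) : Int) = (k : Int) + 1 := by push_cast; ring
  rw [hinit]
  apply PySem.List.foldl_congr_mem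
  intro acc w hw
  have hw1 : 1 ≤ w.toList.length := by
    have h0 := hcb w hw
    cases h : w.toList with
    | nil => exact absurd h h0
    | cons a l => simp
  by_cases hsuf : w.toList <:+ t.take (k+1)
  · have hcond := (suffix_slice_char t w.toList (k+1) hk).mp hsuf
    have hend : PySem.Chars.endswith (t.take (k+1)) w.toList = true :=
      (PySem.Chars.endswith_iff _ _).mpr hsuf
    rw [if_pos (by exact_mod_cast hcond), if_pos hend]
    simp only
    have hlwk : w.toList.length ≤ k+1 := by have := hcond.1; omega
    have hc : ((k : Int) + 1) - (w.toList.length : Int) = ((k + 1 - w.toList.length : Nat) : Int) := by omega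
    rw [hc, PySem.List.slice_to_natCast, List.take_take]
    have hm : min (k + 1 - w.toList.length) (k+1) = k + 1 - w.toList.length := by omega
    rw [hm]
    rw [goA_fuel t cb hcb (k+1-w.toList.length) k (by omega) (by omega)]
    rw [PySem.List.pyGetD_natCast, ih (k+1-w.toList.length) (by omega)]
    omega
  · have hend : ¬ PySem.Chars.endswith (t.take (k+1)) w.toList = true := by
      rw [PySem.Chars.endswith_iff]; exact hsuf
    have hcond : ¬ ((w.toList.length : Int) ≤ (k : Int) + 1 ∧
        PySem.List.slice t (some (((k : Int) + 1) - (w.toList.length : Int))) (some ((k : Int) + 1)) = w.toList) := by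
      intro h
      exact hsuf ((suffix_slice_char t w.toList (k+1) hk).mpr (by exact_mod_cast h))
    rw [if_neg hcond, if_neg hend]
theorem dpA_getD (t : List Char) (cb : List String)
    (hcb : ∀ w ∈ cb, w.toList ≠ []) :
    ∀ k, k ≤ t.length → ∀ j, j ≤ k →
      (dpA t cb k).getD j 0 = goA j (t.take j) cb := by
  intro k
  induction k with
  | zero =>
    intro _ j hj
    have : j = 0 := by omega
    subst this
    rw [dpA_zero]
    simp [goA, List.getD]
  | succ k ih =>
    intro hk j hj
    rw [dpA_succ]
    unfold bLoop
    rw [show ((k : Int) + 1) = ((k + 1 : Nat) : Int) from by push_cast; ring,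
       PySem.List.pySetD_natCast]
    by_cases hjk : j = k + 1
    · subst hjk
      have hlt : k + 1 < (dpA t cb k).length := by rw [dpA_length]; omega
      rw [show ((dpA t cb k).set (k+1) (bBest t cb (dpA t cb k) (((k+1:Nat):Int)))).getD (k+1) 0
            = bBest t cb (dpA t cb k) (((k+1:Nat):Int)) from by simp [List.getD, hlt]]
      have hb := bBest_eq_goA t cb hcb k hk (fun j hj => ih (by omega) j hj)
      rwa [show ((k:Int)+1) = ((k+1:Nat):Int) from by push_cast; ring] at hb
    · have hj' : j ≤ k := by omega
      rw [show ((dpA t cb k).set (k+1) (bBest t cb (dpA t cb k) (((k+1:Nat):Int)))).getD j 0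
            = (dpA t cb k).getD j 0 from by simp [List.getD, Ne.symm hjk]]
      exact ih (by omega) j hj'

theorem min_encode_length_spec' (text : String) (codebook : List String)
    (h : Pre_min_encode_length text codebook) :
    min_encode_length text codebook = min_encode_length_alt text codebook := by
  unfold min_encode_length min_encode_length_alt
  simp only
  rcases h with h | h
  · rw [h]
    show goA 0 [] codebook = PySem.List.pyGetD (dpA [] codebook 0) 0 0
    rw [dpA_zero]
    simp [goA, PySem.List.pyGetD, PySem.List.pyIdx?, PySem.List.pyGet?]
  · have hcb : ∀ w ∈ codebook, w.toList ≠ [] := by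
      intro w hw hnil
      apply h
      have hww : w = "" := by simp [← String.toList_inj, hnil]
      rwa [hww] at hw
    have hmain := dpA_getD text.toList codebook hcb text.toList.length le_rfl
      text.toList.length le_rfl
    rw [List.take_length] at hmain
    show goA text.toList.length text.toList codebook
        = PySem.List.pyGetD (dpA text.toList codebook text.toList.length)
            ((text.toList.length : Nat) : Int) 0
    rw [PySem.List.pyGetD_natCast, hmain]

-- ===== VERDICT (by name: the statement is the Claim_ definition above) =====
theorem min_encode_length_spec : Claim_equal_min_encode_length := by
  intro text codebook _ hpre
  exact min_encode_length_spec' text codebook hpre
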